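-- pv_equiv track=rewrite | github.com/MIKEk8/visual_translater | tools/analyze_dependencies.py | find_circular_imports
-- ===== SOURCE A (Python) =====
-- from typing import Dict, List, Set, Tuple
--
-- def find_circular_imports(dependency_graph: Dict[str, Set[str]]) -> List[List[str]]:
--     """Find circular dependencies using DFS"""
--     def dfs(node, path, visited, rec_stack):
--         visited.add(node)
--         rec_stack.add(node)
--         path.append(node)
--
--         for neighbor in dependency_graph.get(node, set()):
--             if neighbor not in visited:
--                 result = dfs(neighbor, path, visited, rec_stack)
--                 if result:
--                     return result
--             elif neighbor in rec_stack:
--                 # Found cycle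
--                 cycle_start = path.index(neighbor)
--                 return path[cycle_start:] + [neighbor]
--
--         rec_stack.remove(node)
--         path.pop()
--         return None
--
--     cycles = []
--     visited = set()
--
--     for node in dependency_graph:
--         if node not in visited:
--             cycle = dfs(node, [], visited, set())
--             if cycle:
--                 cycles.append(cycle)
--
--     return cycles
-- ===== SOURCE B (Python) =====
-- def find_circular_imports(dependency_graph):
--     """Find circular dependencies using an explicit iterative DFS (stack of frames)."""
--     cycles = []
--     visited = set()
--     for start in dependency_graph:
--         if start in visited:
--             continue
--         visited.add(start)
--         path = [start]
--         rec_stack = {start}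
--         stack = [(start, iter(dependency_graph.get(start, set())))]
--         found = None
--         while stack and found is None:
--             node, it = stack[-1]
--             neighbor = next(it, None)
--             if neighbor is None:
--                 stack.pop()
--                 rec_stack.discard(node)
--                 path.pop()
--             elif neighbor not in visited:
--                 visited.add(neighbor)
--                 rec_stack.add(neighbor)
--                 path.append(neighbor)
--                 stack.append((neighbor, iter(dependency_graph.get(neighbor, set()))))
--             elif neighbor in rec_stack:
--                 found = path[path.index(neighbor):] + [neighbor]
--         if found is not None:
--             cycles.append(found)
--     return cycles
-- ===== Notes on version B (the rewrite author's own statement) =====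
-- stated objective: alternative
-- what changed: A's recursive DFS helper is replaced by an explicit iterative DFS using a stack of (node, remaining-neighbors) frames with a shared visited set and path/rec_stack updated on push/pop; the return value is identical.
import Mathlib
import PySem

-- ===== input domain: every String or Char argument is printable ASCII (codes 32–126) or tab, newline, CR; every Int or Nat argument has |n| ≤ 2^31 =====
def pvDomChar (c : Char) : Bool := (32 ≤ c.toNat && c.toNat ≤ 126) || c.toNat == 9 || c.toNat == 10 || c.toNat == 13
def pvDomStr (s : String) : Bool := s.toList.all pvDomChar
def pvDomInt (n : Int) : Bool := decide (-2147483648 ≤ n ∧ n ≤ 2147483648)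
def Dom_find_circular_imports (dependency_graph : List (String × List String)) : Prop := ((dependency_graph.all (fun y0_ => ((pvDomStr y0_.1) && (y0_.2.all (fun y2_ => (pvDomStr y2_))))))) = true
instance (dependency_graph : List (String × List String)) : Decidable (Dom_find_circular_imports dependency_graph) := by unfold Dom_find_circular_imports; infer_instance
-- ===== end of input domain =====

-- B rewrites A's recursive DFS as an explicit iterative DFS over a stack of (node, remaining-neighbors)
-- frames (objective: alternative decomposition, same asymptotic cost); the returned value is identical.
-- Both ports use a fuel parameter only to make the recursion structural; the fuel
-- (number of distinct vertices + 1) is proved sufficient, so no behaviour depends on it.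

-- ===== PORT A =====
-- all vertices mentioned in the graph (keys and neighbors), used only to size the fuel
def allNodesFC (g : List (String × List String)) : List String :=
  g.flatMap (fun q => q.1 :: q.2)

-- dependency_graph.get(node, set()) — here the neighbor collection in list (insertion) order
def adjFC (g : List (String × List String)) (n : String) : List String :=
  PySem.Dict.getD (PySem.Dict.mk g) n []

def fuelFC (g : List (String × List String)) : Nat :=
  (PySem.List.dedup (allNodesFC g)).length + 1

mutual
-- def dfs(node, path, visited, rec_stack) of A; `path` and `rec_stack` are call-local (Python
-- restores them before every `return None`), `visited` is threaded through; result `none` = fuel ran out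
def dfsA (g : List (String × List String)) : Nat → String → List String →
    PySem.Set String → PySem.Set String → Option (Option (List String) × PySem.Set String)
  | 0, _, _, _, _ => none
  | f+1, node, path, visited, rec =>
      goA g f (adjFC g node) (path ++ [node]) (PySem.Set.add visited node) (PySem.Set.add rec node)
  termination_by f _ _ _ _ => (f, 0)

-- the `for neighbor in dependency_graph.get(node, set())` loop of A's dfs
def goA (g : List (String × List String)) : Nat → List String → List String →
    PySem.Set String → PySem.Set String → Option (Option (List String) × PySem.Set String)
  | _, [], _, visited, _ => some (none, visited)
  | f, nb :: rest, path, visited, rec =>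
      if ¬ PySem.Set.contains visited nb then
        match dfsA g f nb path visited rec with
        | none => none
        | some (some c, v') => some (some c, v')
        | some (none, v') => goA g f rest path v' rec
      else if PySem.Set.contains rec nb then
        -- path.index(neighbor) always succeeds (neighbor ∈ rec_stack ⊆ path); path[i:] with 0 ≤ i is drop
        some (some (path.drop ((PySem.List.index? path nb).getD 0) ++ [nb]), visited)
      else goA g f rest path visited rec
  termination_by f nbs _ _ _ => (f, nbs.length + 1)
end

def find_circular_imports (dependency_graph : List (String × List String)) : List (List String) :=
  (dependency_graph.foldl
    (fun (st : List (List String) × PySem.Set String) p =>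
      if ¬ PySem.Set.contains st.2 p.1 then
        match dfsA dependency_graph (fuelFC dependency_graph) p.1 [] st.2 PySem.Set.empty with
        | none => st                                -- fuel exhausted: proved unreachable
        | some (some c, v') => (st.1 ++ [c], v')
        | some (none, v') => (st.1, v')
      else st)
    ([], PySem.Set.empty)).1

-- ===== PORT B =====
def wtB (s : List (String × List String)) : Nat := (s.map (fun q => q.2.length + 1)).sum

-- the `while stack and found is None` loop of B: frames hold (node, remaining neighbors);
-- fuel is consumed only when a frame is pushed; result `none` = fuel ran out
def loopB (g : List (String × List String)) : Nat → List (String × List String) → List String →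
    PySem.Set String → PySem.Set String → Option (Option (List String) × PySem.Set String)
  | _, [], _, visited, _ => some (none, visited)
  | f, (node, []) :: rest, path, visited, rec =>
      -- neighbor iterator exhausted: pop the frame
      loopB g f rest path.dropLast visited (PySem.Set.discard rec node)
  | f, (node, nb :: nbs) :: rest, path, visited, rec =>
      if ¬ PySem.Set.contains visited nb then
        match f with
        | 0 => none
        | f'+1 => loopB g f' ((nb, adjFC g nb) :: (node, nbs) :: rest)
            (path ++ [nb]) (PySem.Set.add visited nb) (PySem.Set.add rec nb)
      else if PySem.Set.contains rec nb then
        some (some (path.drop ((PySem.List.index? path nb).getD 0) ++ [nb]), visited)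
      else loopB g f ((node, nbs) :: rest) path visited rec
  termination_by f s _ _ _ => (f, wtB s)
  decreasing_by
  · simp [wtB]; omega
  · simp [wtB]; omega
  · simp [wtB]; omega

def find_circular_imports_alt (dependency_graph : List (String × List String)) : List (List String) :=
  (dependency_graph.foldl
    (fun (st : List (List String) × PySem.Set String) p =>
      if ¬ PySem.Set.contains st.2 p.1 then
        match loopB dependency_graph (fuelFC dependency_graph)
            [(p.1, adjFC dependency_graph p.1)] [p.1]
            (PySem.Set.add st.2 p.1) (PySem.Set.add PySem.Set.empty p.1) with
        | none => st                                -- fuel exhausted: proved unreachable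
        | some (some c, v') => (st.1 ++ [c], v')
        | some (none, v') => (st.1, v')
      else st)
    ([], PySem.Set.empty)).1

-- ===== PRECONDITION & SPEC =====
def Spec_find_circular_imports (dependency_graph : List (String × List String)) (out : List (List String)) : Prop := out = find_circular_imports_alt dependency_graph
instance (dependency_graph : List (String × List String)) (out : List (List String)) : Decidable (Spec_find_circular_imports dependency_graph out) := by unfold Spec_find_circular_imports; infer_instance

-- ===== CLAIM (what is proved, stated in full; the proofs are below) =====
def Claim_equal_find_circular_imports : Prop := ∀ (dependency_graph : List (String × List String)), Dom_find_circular_imports dependency_graph → Spec_find_circular_imports dependency_graph (find_circular_imports dependency_graph)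

-- ===== LEMMAS AND PROOFS =====

-- number of vertices not yet visited: bounds the remaining fuel the searches need
def freshFC (g : List (String × List String)) (v : PySem.Set String) : Nat :=
  (PySem.List.dedup (allNodesFC g)).countP (fun x => !PySem.Set.contains v x)

theorem contains_iff_memFC (v : PySem.Set String) (x : String) :
    PySem.Set.contains v x = true ↔ x ∈ v := by
  simp [PySem.Set.contains]

theorem contains_eq_false_iffFC (v : PySem.Set String) (x : String) :
    PySem.Set.contains v x = false ↔ x ∉ v := by
  simp [PySem.Set.contains]

theorem mem_adjFC {g : List (String × List String)} {n x : String}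
    (h : x ∈ adjFC g n) : x ∈ allNodesFC g := by
  unfold adjFC PySem.Dict.getD PySem.Dict.get? at h
  cases hf : List.find? (fun p => p.1 == n) (PySem.Dict.mk g).items with
  | none => rw [hf] at h; simp at h
  | some pr =>
    rw [hf] at h; simp at h
    have hmem : pr ∈ g := List.mem_of_find?_eq_some hf
    simp [allNodesFC, List.mem_flatMap]
    exact ⟨pr.1, pr.2, hmem, Or.inr h⟩

theorem freshFC_lt_fuelFC (g : List (String × List String)) (v : PySem.Set String) :
    freshFC g v < fuelFC g := by
  have := List.countP_le_length (l := PySem.List.dedup (allNodesFC g))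
    (p := fun x => !PySem.Set.contains v x)
  simp only [freshFC, fuelFC]; omega

theorem freshFC_anti {g : List (String × List String)} {v w : PySem.Set String}
    (h : ∀ x, x ∈ v → x ∈ w) : freshFC g w ≤ freshFC g v := by
  apply List.countP_mono_left
  intro a _ ha
  rw [Bool.not_eq_true', contains_eq_false_iffFC] at ha
  rw [Bool.not_eq_true', contains_eq_false_iffFC]
  exact fun hav => ha (h a hav)

theorem mem_addFC {v : PySem.Set String} {x n : String} (h : x ∈ v) :
    x ∈ PySem.Set.add v n := by
  simp [PySem.Set.mem_add, h]

theorem countP_ltFC {α : Type} (p q : α → Bool) (l : List α)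
    (hpq : ∀ a ∈ l, p a → q a) (a : α) (ha : a ∈ l) (hp : p a = false) (hq : q a = true) :
    l.countP p < l.countP q := by
  induction l with
  | nil => cases ha
  | cons b l ih =>
    rcases List.mem_cons.mp ha with rfl | hmem
    · have hle := List.countP_mono_left (l := l) (p := p) (q := q)
        (fun x hx => hpq x (List.mem_cons_of_mem _ hx))
      simp [hp, hq]; omega
    · have hlt := ih (fun x hx => hpq x (List.mem_cons_of_mem _ hx)) hmem
      have : (if p b then 1 else 0) ≤ (if q b then 1 else 0) := by
        by_cases hb : p b = true
        · simp [hb, hpq b (List.mem_cons_self) hb]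
        · simp at hb; simp [hb]
      simp [List.countP_cons]; omega

theorem freshFC_add_lt {g : List (String × List String)} {v : PySem.Set String} {n : String}
    (hn : n ∈ allNodesFC g) (hv : n ∉ v) :
    freshFC g (PySem.Set.add v n) < freshFC g v := by
  have hmemd : n ∈ PySem.List.dedup (allNodesFC g) := by
    rw [PySem.List.mem_dedup]; exact hn
  refine countP_ltFC _ _ _ ?_ n hmemd ?_ ?_
  · intro a _ ha
    rw [Bool.not_eq_true', contains_eq_false_iffFC] at ha
    rw [Bool.not_eq_true', contains_eq_false_iffFC]
    exact fun hav => ha (mem_addFC hav)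
  · simp [PySem.Set.mem_add]
  · rw [Bool.not_eq_true', contains_eq_false_iffFC]
    exact hv

theorem discard_addFC {r : PySem.Set String} {n : String} (h : n ∉ r) :
    PySem.Set.discard (PySem.Set.add r n) n = r := by
  have hfr : List.filter (fun y => !y == n) r = r :=
    List.filter_eq_self.mpr (fun a hma => by
      have hne : a ≠ n := fun e => h (e ▸ hma)
      simp [hne])
  simp [PySem.Set.add, PySem.Set.discard, h, List.filter_append, hfr]

theorem mem_discardFC {r : PySem.Set String} {x n : String}
    (h : x ∈ PySem.Set.discard r n) : x ∈ r := by
  simp [PySem.Set.discard] at h; exact h.1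

-- visited only grows
mutual
theorem grow_dfsA (g : List (String × List String)) :
    ∀ (f : Nat) (n : String) (p : List String) (v r : PySem.Set String)
      (c? : Option (List String)) (v' : PySem.Set String),
      dfsA g f n p v r = some (c?, v') → ∀ x, x ∈ v → x ∈ v' := by
  intro f n p v r c? v' h x hx
  match f with
  | 0 => simp [dfsA] at h
  | f+1 =>
    rw [dfsA] at h
    exact grow_goA g f _ _ _ _ _ _ h x (mem_addFC hx)
  termination_by f _ _ _ _ _ _ _ _ _ => (f, 0)
theorem grow_goA (g : List (String × List String)) :
    ∀ (f : Nat) (nbs : List String) (p : List String) (v r : PySem.Set String)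
      (c? : Option (List String)) (v' : PySem.Set String),
      goA g f nbs p v r = some (c?, v') → ∀ x, x ∈ v → x ∈ v' := by
  intro f nbs p v r c? v' h x hx
  match nbs with
  | [] => rw [goA] at h; injection h with h'; cases h'; exact hx
  | nb :: rest =>
    rw [goA] at h
    split at h
    · cases hd : dfsA g f nb p v r with
      | none => rw [hd] at h; simp at h
      | some y =>
        obtain ⟨c1, w⟩ := y
        rw [hd] at h
        cases c1 with
        | some c => simp at h; exact h.2 ▸ grow_dfsA g f _ _ _ _ _ _ hd x hx
        | none => exact grow_goA g f _ _ _ _ _ _ h x (grow_dfsA g f _ _ _ _ _ _ hd x hx)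
    · split at h
      · injection h with h'; cases h'; exact hx
      · exact grow_goA g f _ _ _ _ _ _ h x hx
  termination_by f nbs _ _ _ _ _ _ _ _ => (f, nbs.length + 1)
end

-- more fuel never changes a result that was already delivered
mutual
theorem mono_dfsA (g : List (String × List String)) :
    ∀ (f : Nat) (n : String) (p : List String) (v r : PySem.Set String)
      (x : Option (List String) × PySem.Set String),
      dfsA g f n p v r = some x → dfsA g (f+1) n p v r = some x := by
  intro f n p v r x h
  match f with
  | 0 => simp [dfsA] at h
  | f+1 =>
    rw [dfsA] at h
    rw [dfsA]
    exact mono_goA g f _ _ _ _ _ h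
  termination_by f _ _ _ _ _ _ => (f, 0)
theorem mono_goA (g : List (String × List String)) :
    ∀ (f : Nat) (nbs : List String) (p : List String) (v r : PySem.Set String)
      (x : Option (List String) × PySem.Set String),
      goA g f nbs p v r = some x → goA g (f+1) nbs p v r = some x := by
  intro f nbs p v r x h
  match nbs with
  | [] => rw [goA] at h; rw [goA]; exact h
  | nb :: rest =>
    rw [goA] at h
    rw [goA]
    by_cases hc : ¬ PySem.Set.contains v nb = true
    · rw [if_pos hc] at h
      rw [if_pos hc]
      cases hd : dfsA g f nb p v r with
      | none => rw [hd] at h; simp at h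
      | some y =>
        have hd' := mono_dfsA g f nb p v r y hd
        rw [hd] at h
        rw [hd']
        obtain ⟨c1, w⟩ := y
        cases c1 with
        | some c => exact h
        | none => exact mono_goA g f rest p w r x h
    · rw [if_neg hc] at h
      rw [if_neg hc]
      by_cases hr : PySem.Set.contains r nb = true
      · rw [if_pos hr] at h; rw [if_pos hr]; exact h
      · rw [if_neg hr] at h; rw [if_neg hr]; exact mono_goA g f rest p v r x h
  termination_by f nbs _ _ _ _ _ => (f, nbs.length + 1)
end

theorem mono_le_goA (g : List (String × List String)) {f f' : Nat} (hle : f ≤ f')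
    {nbs p v r x} (h : goA g f nbs p v r = some x) : goA g f' nbs p v r = some x := by
  induction f', hle using Nat.le_induction with
  | base => exact h
  | succ f' hf ih => exact mono_goA g f' _ _ _ _ _ ih

theorem fresh_posFC {g : List (String × List String)} {v : PySem.Set String} {n : String}
    (hn : n ∈ allNodesFC g) (hv : n ∉ v) : 1 ≤ freshFC g v := by
  have : 0 < (PySem.List.dedup (allNodesFC g)).countP (fun x => !PySem.Set.contains v x) := by
    rw [List.countP_pos_iff]
    refine ⟨n, (PySem.List.mem_dedup _ _).mpr hn, ?_⟩
    rw [Bool.not_eq_true', contains_eq_false_iffFC]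
    exact hv
  simpa [freshFC] using this

-- enough fuel never runs out
mutual
theorem suff_dfsA (g : List (String × List String)) :
    ∀ (f : Nat) (n : String) (p : List String) (v r : PySem.Set String),
      n ∉ v → n ∈ allNodesFC g → freshFC g v ≤ f →
      (dfsA g f n p v r).isSome := by
  intro f n p v r hv hn hf
  have h1 := fresh_posFC hn hv
  match f with
  | 0 => omega
  | f+1 =>
    rw [dfsA]
    apply suff_goA g f
    · exact fun nb hnb => mem_adjFC hnb
    · have := freshFC_add_lt hn hv
      omega
  termination_by f _ _ _ _ _ _ _ => (f, 0)
theorem suff_goA (g : List (String × List String)) :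
    ∀ (f : Nat) (nbs : List String) (p : List String) (v r : PySem.Set String),
      (∀ nb ∈ nbs, nb ∈ allNodesFC g) → freshFC g v ≤ f →
      (goA g f nbs p v r).isSome := by
  intro f nbs p v r hnb hf
  match nbs with
  | [] => rw [goA]; simp
  | nb :: rest =>
    rw [goA]
    by_cases hc : ¬ PySem.Set.contains v nb = true
    · rw [if_pos hc]
      have hvnb : nb ∉ v := by
        rw [contains_iff_memFC] at hc; exact hc
      have hs := suff_dfsA g f nb p v r hvnb (hnb nb List.mem_cons_self) hf
      cases hd : dfsA g f nb p v r with
      | none => rw [hd] at hs; simp at hs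
      | some y =>
        obtain ⟨c1, w⟩ := y
        cases c1 with
        | some c => simp
        | none =>
          apply suff_goA g f rest p w r
          · exact fun x hx => hnb x (List.mem_cons_of_mem _ hx)
          · have hsub := grow_dfsA g f nb p v r none w hd
            exact le_trans (freshFC_anti hsub) hf
    · rw [if_neg hc]
      by_cases hr : PySem.Set.contains r nb = true
      · rw [if_pos hr]; simp
      · rw [if_neg hr]
        exact suff_goA g f rest p v r (fun x hx => hnb x (List.mem_cons_of_mem _ hx)) hf
  termination_by f nbs _ _ _ _ _ => (f, nbs.length + 1)
end

theorem goA_fuelFC_eq (g : List (String × List String)) {f : Nat} {nbs p : List String}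
    {v r : PySem.Set String}
    (hnb : ∀ nb ∈ nbs, nb ∈ allNodesFC g) (hf : freshFC g v ≤ f) (hf' : f ≤ fuelFC g) :
    goA g f nbs p v r = goA g (fuelFC g) nbs p v r := by
  have hs := suff_goA g f nbs p v r hnb hf
  cases hx : goA g f nbs p v r with
  | none => rw [hx] at hs; simp at hs
  | some x => rw [mono_le_goA g hf' hx]

-- A-side meaning of B's stack: run the top frame's remaining neighbors, then pop and continue
def runA (g : List (String × List String)) :
    List (String × List String) → List String → PySem.Set String → PySem.Set String →
    Option (Option (List String) × PySem.Set String)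
  | [], _, visited, _ => some (none, visited)
  | (n, nbs) :: rest, path, visited, rec =>
      match goA g (fuelFC g) nbs path visited rec with
      | none => none
      | some (some c, v') => some (some c, v')
      | some (none, v') => runA g rest path.dropLast v' (PySem.Set.discard rec n)

-- the simulation: B's loop computes exactly runA
theorem dfsA_fuelFC_unfold (g : List (String × List String)) (nb : String)
    (p : List String) (v r : PySem.Set String) :
    dfsA g (fuelFC g) nb p v r
      = goA g (fuelFC g) (adjFC g nb) (p ++ [nb]) (PySem.Set.add v nb) (PySem.Set.add r nb) := by
  conv_lhs => rw [show fuelFC g = (PySem.List.dedup (allNodesFC g)).length + 1 from rfl, dfsA]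
  apply goA_fuelFC_eq g (fun x hx => mem_adjFC hx)
  · have := freshFC_lt_fuelFC g (PySem.Set.add v nb)
    simp only [fuelFC] at this
    omega
  · simp [fuelFC]

theorem sim_loopB (g : List (String × List String)) :
    ∀ (f : Nat) (st : List (String × List String)) (p : List String) (v r : PySem.Set String),
      (∀ fr ∈ st, ∀ nb ∈ fr.2, nb ∈ allNodesFC g) →
      (∀ x, x ∈ r → x ∈ v) →
      freshFC g v < f →
      loopB g f st p v r = runA g st p v r := by
  intro f st p v r
  induction f, st, p, v, r using loopB.induct g with
  | case1 f p v r =>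
    intro _ _ _
    rw [loopB, runA]
  | case2 f node rest path v r ih =>
    intro hfr hrv hf
    rw [loopB, runA, goA]
    rw [ih (fun fr h => hfr fr (List.mem_cons_of_mem _ h))
        (fun x hx => hrv x (mem_discardFC hx)) hf]
  | case3 node nb nbs rest path v r hc =>
    intro _ _ hf
    omega
  | case4 node nb nbs rest path v r hc f' ih =>
    intro hfr hrv hf
    have hnb_all : nb ∈ allNodesFC g :=
      hfr (node, nb :: nbs) List.mem_cons_self nb List.mem_cons_self
    have hnbv : nb ∉ v := by rw [contains_iff_memFC] at hc; exact hc
    have hnbr : nb ∉ r := fun hmem => hnbv (hrv nb hmem)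
    have hlt := freshFC_add_lt hnb_all hnbv
    have hfr' : ∀ fr ∈ (nb, adjFC g nb) :: (node, nbs) :: rest, ∀ x ∈ fr.2, x ∈ allNodesFC g := by
      intro fr hmem x hx
      rcases List.mem_cons.mp hmem with rfl | hmem'
      · exact mem_adjFC hx
      · rcases List.mem_cons.mp hmem' with rfl | hmem''
        · exact hfr (node, nb :: nbs) List.mem_cons_self x (List.mem_cons_of_mem _ hx)
        · exact hfr fr (List.mem_cons_of_mem _ hmem'') x hx
    have hrv' : ∀ x, x ∈ PySem.Set.add r nb → x ∈ PySem.Set.add v nb := by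
      intro x hx
      rcases (PySem.Set.mem_add r nb x).mp hx with hx' | rfl
      · exact mem_addFC (hrv x hx')
      · simp [PySem.Set.mem_add]
    rw [loopB, if_pos hc]
    rw [ih hfr' hrv' (by omega)]
    have hsuf : (goA g (fuelFC g) (adjFC g nb) (path ++ [nb]) (PySem.Set.add v nb) (PySem.Set.add r nb)).isSome := by
      apply suff_goA g _ _ _ _ _ (fun x hx => mem_adjFC hx)
      have := freshFC_lt_fuelFC g (PySem.Set.add v nb)
      omega
    cases hgo : goA g (fuelFC g) (adjFC g nb) (path ++ [nb]) (PySem.Set.add v nb) (PySem.Set.add r nb) with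
    | none => rw [hgo] at hsuf; simp at hsuf
    | some y =>
      obtain ⟨c1, w⟩ := y
      have hdfs : dfsA g (fuelFC g) nb path v r = some (c1, w) := by
        rw [dfsA_fuelFC_unfold, hgo]
      cases c1 with
      | some c =>
        conv_lhs => rw [runA, hgo]
        conv_rhs => rw [runA, goA, if_pos hc, hdfs]
      | none =>
        conv_lhs => rw [runA, hgo]
        conv_rhs => rw [runA, goA, if_pos hc, hdfs]
        simp only [List.dropLast_concat, discard_addFC hnbr]
        conv_lhs => rw [runA]
  | case5 f node nb nbs rest path v r hc hr =>
    intro hfr hrv hf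
    rw [loopB.eq_def]
    simp only [if_neg hc, if_pos hr]
    conv_rhs => rw [runA, goA, if_neg hc, if_pos hr]
  | case6 f node nb nbs rest path v r hc hr ih =>
    intro hfr hrv hf
    rw [loopB.eq_def]
    simp only [if_neg hc, if_neg hr]
    have hfr' : ∀ fr ∈ (node, nbs) :: rest, ∀ x ∈ fr.2, x ∈ allNodesFC g := by
      intro fr hmem x hx
      rcases List.mem_cons.mp hmem with rfl | hmem'
      · exact hfr (node, nb :: nbs) List.mem_cons_self x (List.mem_cons_of_mem _ hx)
      · exact hfr fr (List.mem_cons_of_mem _ hmem') x hx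
    rw [ih hfr' hrv hf]
    conv_rhs => rw [runA, goA, if_neg hc, if_neg hr]
    conv_lhs => rw [runA]

theorem step_eq (g : List (String × List String)) (n : String) (v : PySem.Set String) :
    loopB g (fuelFC g) [(n, adjFC g n)] [n]
        (PySem.Set.add v n) (PySem.Set.add PySem.Set.empty n)
      = dfsA g (fuelFC g) n [] v PySem.Set.empty := by
  rw [sim_loopB g _ _ _ _ _
      (by rintro fr hfr x hx
          rcases List.mem_cons.mp hfr with rfl | h
          · exact mem_adjFC hx
          · cases h)
      (by intro x hx
          rcases (PySem.Set.mem_add PySem.Set.empty n x).mp hx with h | rfl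
          · cases h
          · simp [PySem.Set.mem_add])
      (freshFC_lt_fuelFC g _)]
  conv_rhs => rw [dfsA_fuelFC_unfold g n [] v PySem.Set.empty]
  simp only [List.nil_append]
  cases hgo : goA g (fuelFC g) (adjFC g n) [n] (PySem.Set.add v n) (PySem.Set.add PySem.Set.empty n) with
  | none => simp only [runA.eq_def, hgo]
  | some y =>
    obtain ⟨c1, w⟩ := y
    cases c1 with
    | some c => simp only [runA.eq_def, hgo]
    | none => simp only [runA.eq_def, hgo]

-- ===== VERDICT (by name: the statement is the Claim_ definition above) =====
theorem find_circular_imports_spec : Claim_equal_find_circular_imports := by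
  intro g _
  unfold Spec_find_circular_imports find_circular_imports find_circular_imports_alt
  congr 1
  congr 1
  funext st p
  rw [step_eq g p.1 st.2]
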